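-- pv_equiv track=rewrite | github.com/CodeAlanqian/codealan-blog | scripts/fix_tags_vln.py | ensure_vln_tag
-- ===== SOURCE A (Python) =====
-- def ensure_vln_tag(front_matter: str) -> tuple[str, bool]:
--     lines = front_matter.splitlines()
--     have_tags = any(line.strip().startswith("tags:") for line in lines)
--     changed = False
--
--     if have_tags:
--         new_lines: list[str] = []
--         in_tags = False
--         has_vln = False
--         for i, line in enumerate(lines):
--             stripped = line.strip()
--             if not in_tags and stripped.startswith("tags:"):
--                 new_lines.append("tags:")
--                 in_tags = True
--                 continue
--             if in_tags:
--                 # 仍然在 tags 列表中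
--                 if stripped.startswith("-"):
--                     val = stripped[1:].strip().strip("'\"")
--                     if val.lower() == "vln":
--                         has_vln = True
--                     new_lines.append(line)
--                     continue
--                 # tags 列表结束，遇到非缩进行
--                 if not has_vln:
--                     new_lines.append("- VLN")
--                     changed = True
--                 in_tags = False
--                 new_lines.append(line)
--             else:
--                 new_lines.append(line)
--
--         if in_tags and not has_vln:
--             new_lines.append("- VLN")
--             changed = True
--
--         return "\n".join(new_lines), changed
--
--     # 没有 tags: 行，插入一个
--     new_lines = []
--     inserted = False
--     for line in lines:
--         new_lines.append(line)
--         stripped = line.strip()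
--         if not inserted and (stripped.startswith("draft:") or stripped.startswith("lastmod:") or stripped.startswith("date:")):
--             # 尝试在这些字段之后插入
--             continue
--     # 简单策略：在末尾加一个 tags 块
--     new_lines.append("tags:")
--     new_lines.append("- VLN")
--     changed = True
--     return "\n".join(new_lines), changed
-- ===== SOURCE B (Python) =====
-- def ensure_vln_tag(front_matter: str) -> tuple[str, bool]:
--     lines = front_matter.splitlines()
--     tag_idx = next((k for k, l in enumerate(lines) if l.strip().startswith("tags:")), None)
--     if tag_idx is None:
--         return "\n".join(lines + ["tags:", "- VLN"]), True
--     rest = lines[tag_idx + 1:]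
--     j = 0
--     while j < len(rest) and rest[j].strip().startswith("-"):
--         j += 1
--     block = rest[:j]
--     has_vln = any(b.strip()[1:].strip().strip("'\"").lower() == "vln" for b in block)
--     out = lines[:tag_idx] + ["tags:"] + block + ([] if has_vln else ["- VLN"]) + rest[j:]
--     return "\n".join(out), not has_vln
-- ===== Notes on version B (the rewrite author's own statement) =====
-- stated objective: simpler
-- what changed: B replaces A's four-variable line-by-line state machine with one structural pass: locate the first 'tags:' line, slice off the consecutive dash block after it, and rebuild the output as prefix ++ 'tags:' ++ block ++ optional '- VLN' ++ tail (or append a fresh tags block when none exists).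
import Mathlib
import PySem

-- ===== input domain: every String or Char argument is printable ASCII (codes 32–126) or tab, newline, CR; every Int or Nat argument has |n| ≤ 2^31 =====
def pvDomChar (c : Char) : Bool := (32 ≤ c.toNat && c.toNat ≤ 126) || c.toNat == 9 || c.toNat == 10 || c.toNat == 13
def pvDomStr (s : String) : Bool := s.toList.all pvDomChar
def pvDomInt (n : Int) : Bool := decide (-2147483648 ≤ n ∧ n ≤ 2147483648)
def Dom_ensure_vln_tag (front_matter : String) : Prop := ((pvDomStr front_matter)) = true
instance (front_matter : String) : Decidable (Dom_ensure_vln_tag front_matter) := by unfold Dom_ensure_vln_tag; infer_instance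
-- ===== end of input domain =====

-- B rebuilds the output once from the first 'tags:' line (prefix ++ "tags:" ++ dash block
-- ++ optional "- VLN" ++ tail) instead of A's four-field line-by-line state machine;
-- objective: simpler, not faster.

-- ===== PORT A =====
-- shared tests, exactly the Python expressions both programs compute on a line
def isTagsLine (line : String) : Bool := PySem.Str.startswith (PySem.Str.strip line) "tags:"
def isDashLine (line : String) : Bool := PySem.Str.startswith (PySem.Str.strip line) "-"
-- val = stripped[1:].strip().strip("'\"");  val.lower() == "vln"
def isVln (line : String) : Bool :=
  PySem.Str.lower (PySem.Str.stripChars (PySem.Str.strip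
      (PySem.Str.slice (PySem.Str.strip line) (some 1) none)) "'\"") == "vln"

-- loop body of A's tags branch; state = (new_lines, in_tags, has_vln, changed)
def vlnStep (s : List String × Bool × Bool × Bool) (line : String) :
    List String × Bool × Bool × Bool :=
  let (new_lines, in_tags, has_vln, changed) := s
  if !in_tags && isTagsLine line then
    (new_lines ++ ["tags:"], true, has_vln, changed)
  else if in_tags then
    if isDashLine line then
      (new_lines ++ [line], in_tags, has_vln || isVln line, changed)
    else if !has_vln then
      (new_lines ++ ["- VLN", line], false, has_vln, true)
    else
      (new_lines ++ [line], false, has_vln, changed)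
  else
    (new_lines ++ [line], in_tags, has_vln, changed)

def ensure_vln_tag (front_matter : String) : String × Bool :=
  let lines := PySem.Str.splitlines front_matter
  let have_tags := lines.any isTagsLine
  if have_tags then
    match lines.foldl vlnStep ([], false, false, false) with
    | (new_lines, in_tags, has_vln, changed) =>
      if in_tags && !has_vln then (PySem.Str.join "\n" (new_lines ++ ["- VLN"]), true)
      else (PySem.Str.join "\n" new_lines, changed)
  else
    -- no 'tags:' line: the Python loop only copies the lines ('inserted' never changes)
    let new_lines := lines.foldl (fun acc line => acc ++ [line]) []
    (PySem.Str.join "\n" (new_lines ++ ["tags:", "- VLN"]), true)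

-- ===== PORT B =====
def ensure_vln_tag_alt (front_matter : String) : String × Bool :=
  let lines := PySem.Str.splitlines front_matter
  match lines.findIdx? isTagsLine with
  | none => (PySem.Str.join "\n" (lines ++ ["tags:", "- VLN"]), true)
  | some tag_idx =>
    let rest := lines.drop (tag_idx + 1)
    let block := rest.takeWhile isDashLine
    let tail := rest.dropWhile isDashLine
    let has_vln := block.any isVln
    let out := lines.take tag_idx ++ ["tags:"] ++ block ++
      (if has_vln then [] else ["- VLN"]) ++ tail
    (PySem.Str.join "\n" out, !has_vln)

-- ===== PRECONDITION & SPEC =====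
-- Pre_ excludes front matter with two or more 'tags:' lines (a duplicate YAML key): which
-- later blocks get a '- VLN' there is an accident of A's state machine (a second block is
-- skipped or processed depending on the line right before it), and B handles only the first.
def Pre_ensure_vln_tag (front_matter : String) : Prop :=
  (PySem.Str.splitlines front_matter).countP isTagsLine ≤ 1
instance (front_matter : String) : Decidable (Pre_ensure_vln_tag front_matter) := by
  unfold Pre_ensure_vln_tag; infer_instance
def pvWitness_ensure_vln_tag : String := "title: x\ntags:\n- a"
def Spec_ensure_vln_tag (front_matter : String) (out : String × Bool) : Prop :=
  out = ensure_vln_tag_alt front_matter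
instance (front_matter : String) (out : String × Bool) : Decidable (Spec_ensure_vln_tag front_matter out) := by
  unfold Spec_ensure_vln_tag; infer_instance

-- ===== CLAIM (what is proved, stated in full; the proofs are below) =====
def Claim_equal_ensure_vln_tag : Prop := ∀ (front_matter : String), Dom_ensure_vln_tag front_matter → Pre_ensure_vln_tag front_matter → Spec_ensure_vln_tag front_matter (ensure_vln_tag front_matter)

-- ===== LEMMAS AND PROOFS =====

-- lines without a 'tags:' line are copied through while out of a tags block
theorem foldl_vlnStep_no_tags (ls : List String) (acc : List String) (hv ch : Bool)
    (h : ∀ l ∈ ls, isTagsLine l = false) :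
    ls.foldl vlnStep (acc, false, hv, ch) = (acc ++ ls, false, hv, ch) := by
  induction ls generalizing acc with
  | nil => simp
  | cons x xs ih =>
    have hx : isTagsLine x = false := h x (by simp)
    simp [vlnStep, hx, ih (acc ++ [x]) (fun l hl => h l (by simp [hl]))]

-- a run of dash lines inside the tags block appends them and accumulates has_vln
theorem foldl_vlnStep_dash (ls : List String) (acc : List String) (hv ch : Bool)
    (h : ∀ l ∈ ls, isDashLine l = true) :
    ls.foldl vlnStep (acc, true, hv, ch) = (acc ++ ls, true, hv || ls.any isVln, ch) := by
  induction ls generalizing acc hv with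
  | nil => simp
  | cons x xs ih =>
    have hx : isDashLine x = true := h x (by simp)
    simp [vlnStep, hx, ih (acc ++ [x]) (hv || isVln x) (fun l hl => h l (by simp [hl])),
      Bool.or_assoc]

theorem dropWhile_head_false {α : Type} (p : α → Bool) (l : List α) (t : α) (ts : List α)
    (h : l.dropWhile p = t :: ts) : p t = false := by
  induction l with
  | nil => simp at h
  | cons x xs ih =>
    rw [List.dropWhile_cons] at h
    split at h
    · exact ih h
    · cases h
      exact Bool.eq_false_iff.mpr ‹¬ _›

-- the fold over the lines after the tags line, when the dash block is followed by a line
theorem foldl_vlnStep_rest_cons (r : List String) (acc : List String) (t0 : String)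
    (ts : List String) (hno : ∀ l ∈ r, isTagsLine l = false)
    (htail : r.dropWhile isDashLine = t0 :: ts) :
    r.foldl vlnStep (acc, true, false, false) =
      (acc ++ r.takeWhile isDashLine ++
        (if (r.takeWhile isDashLine).any isVln then [t0] else ["- VLN", t0]) ++ ts,
        false, (r.takeWhile isDashLine).any isVln,
        !(r.takeWhile isDashLine).any isVln) := by
  have hblock : ∀ l ∈ r.takeWhile isDashLine, isDashLine l = true :=
    fun l hl => List.mem_takeWhile_imp hl
  have ht0d : isDashLine t0 = false := dropWhile_head_false _ _ _ _ htail
  have ht0t : isTagsLine t0 = false := by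
    apply hno
    exact (List.dropWhile_sublist (p := isDashLine) (l := r)).subset (by simp [htail])
  have hts_no : ∀ l ∈ ts, isTagsLine l = false := by
    intro l hl
    apply hno
    exact (List.dropWhile_sublist (p := isDashLine) (l := r)).subset (by simp [htail, hl])
  conv_lhs => rw [← List.takeWhile_append_dropWhile (p := isDashLine) (l := r)]
  rw [htail, List.foldl_append, foldl_vlnStep_dash _ _ _ _ hblock, List.foldl_cons]
  cases hv : (r.takeWhile isDashLine).any isVln with
  | false =>
    have hs : vlnStep (acc ++ r.takeWhile isDashLine, true, false || false, false) t0 =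
        (acc ++ r.takeWhile isDashLine ++ ["- VLN", t0], false, false, true) := by
      simp [vlnStep, ht0t, ht0d]
    rw [hs, foldl_vlnStep_no_tags _ _ _ _ hts_no]
    simp
  | true =>
    have hs : vlnStep (acc ++ r.takeWhile isDashLine, true, false || true, false) t0 =
        (acc ++ r.takeWhile isDashLine ++ [t0], false, true, false) := by
      simp [vlnStep, ht0t, ht0d]
    rw [hs, foldl_vlnStep_no_tags _ _ _ _ hts_no]
    simp

-- ===== VERDICT (by name: the statement is the Claim_ definition above) =====
theorem ensure_vln_tag_spec : Claim_equal_ensure_vln_tag := by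
  intro fm _ hpre
  unfold Pre_ensure_vln_tag at hpre
  unfold Spec_ensure_vln_tag ensure_vln_tag ensure_vln_tag_alt
  generalize (PySem.Str.splitlines fm) = ls at hpre ⊢
  cases hidx : ls.findIdx? isTagsLine with
  | none =>
    have hnone : ∀ l ∈ ls, isTagsLine l = false := List.findIdx?_eq_none_iff.mp hidx
    have hany : ls.any isTagsLine = false := by
      simp only [List.any_eq_false]; intro x hx; simp [hnone x hx]
    simp only [hidx, hany, Bool.false_eq_true, if_false]
    rw [PySem.List.foldl_append_singleton_eq_self]
    simp
  | some i =>
    obtain ⟨hlt, hpt, hprev⟩ := List.findIdx?_eq_some_iff_getElem.mp hidx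
    have hany : ls.any isTagsLine = true := List.any_eq_true.mpr ⟨ls[i], by simp, hpt⟩
    simp only [hidx, hany, if_true]
    have hdec : ls = ls.take i ++ ls[i] :: ls.drop (i + 1) := by
      conv_lhs => rw [← List.take_append_drop i ls]
      rw [← List.getElem_cons_drop hlt]
    -- prefix has no tags line (findIdx? found the first one)
    have hpre_no : ∀ l ∈ ls.take i, isTagsLine l = false := by
      intro l hl
      obtain ⟨j, hj, hjl⟩ := List.getElem_of_mem hl
      have hji : j < i := lt_of_lt_of_le hj (by simp)
      have hl' : l = ls[j] := by rw [← hjl]; exact List.getElem_take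
      rw [hl']
      simp only [Bool.not_eq_true] at hprev
      exact hprev j hji
    -- the rest after the tags line has no tags line either, by Pre_
    have hrest_no : ∀ l ∈ ls.drop (i + 1), isTagsLine l = false := by
      have h1 : (ls.take i ++ ls[i] :: ls.drop (i + 1)).countP isTagsLine =
          (ls.take i).countP isTagsLine + ((ls.drop (i + 1)).countP isTagsLine + 1) := by
        rw [List.countP_append, List.countP_cons, hpt]
        simp
      rw [← hdec] at h1
      have hcnt : (ls.drop (i + 1)).countP isTagsLine = 0 := by omega
      intro l hl
      simpa using List.countP_eq_zero.mp hcnt l hl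
    conv_lhs => rw [hdec]
    rw [List.foldl_append, foldl_vlnStep_no_tags _ _ _ _ hpre_no, List.foldl_cons]
    have hstep : vlnStep (([] : List String) ++ ls.take i, false, false, false) ls[i] =
        (ls.take i ++ ["tags:"], true, false, false) := by
      simp [vlnStep, hpt]
    rw [hstep]
    cases htail : (ls.drop (i + 1)).dropWhile isDashLine with
    | nil =>
      have hall : ∀ l ∈ ls.drop (i + 1), isDashLine l = true :=
        List.dropWhile_eq_nil_iff.mp htail
      have htake : (ls.drop (i + 1)).takeWhile isDashLine = ls.drop (i + 1) :=
        List.takeWhile_eq_self_iff.mpr hall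
      rw [foldl_vlnStep_dash _ _ _ _ hall]
      cases hv : (ls.drop (i + 1)).any isVln <;> simp [hv, htake]
    | cons t0 ts =>
      rw [foldl_vlnStep_rest_cons _ _ _ _ hrest_no htail]
      cases hv : ((ls.drop (i + 1)).takeWhile isDashLine).any isVln <;> simp
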